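-- pv_equiv track=rewrite | github.com/icloud-ecnu/Tetris | complementary_experiment/utl.py | getNumOfLongTravel
-- ===== SOURCE A (Python) =====
-- def getNumOfLongTravel(trace : dict):
--     res=0
--     for containerid, nodeids in trace.items():
--         for i in range(len(nodeids)):
--             for j in range(i+3, len(nodeids)):
--                 if nodeids[j]==nodeids[i]:
--                     res+=1
--                     break
--     return res
-- ===== SOURCE B (Python) =====
-- def getNumOfLongTravel(trace: dict):
--     # One reverse pass per container: `last` maps a value to its largest index
--     # among positions strictly to the right; position i counts iff last[v] >= i+3.
--     res = 0
--     for nodeids in trace.values():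
--         last = {}
--         for i, v in reversed(list(enumerate(nodeids))):
--             if v in last and last[v] >= i + 3:
--                 res += 1
--             if v not in last:
--                 last[v] = i
--     return res
-- ===== Notes on version B (the rewrite author's own statement) =====
-- stated objective: alternative
-- what changed: A's nested index scans (for each position, search forward for an equal value at distance >= 3) are replaced by a single reverse pass per container maintaining a dict from value to its largest later index; a position counts iff that index is at least i+3.
import Mathlib
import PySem

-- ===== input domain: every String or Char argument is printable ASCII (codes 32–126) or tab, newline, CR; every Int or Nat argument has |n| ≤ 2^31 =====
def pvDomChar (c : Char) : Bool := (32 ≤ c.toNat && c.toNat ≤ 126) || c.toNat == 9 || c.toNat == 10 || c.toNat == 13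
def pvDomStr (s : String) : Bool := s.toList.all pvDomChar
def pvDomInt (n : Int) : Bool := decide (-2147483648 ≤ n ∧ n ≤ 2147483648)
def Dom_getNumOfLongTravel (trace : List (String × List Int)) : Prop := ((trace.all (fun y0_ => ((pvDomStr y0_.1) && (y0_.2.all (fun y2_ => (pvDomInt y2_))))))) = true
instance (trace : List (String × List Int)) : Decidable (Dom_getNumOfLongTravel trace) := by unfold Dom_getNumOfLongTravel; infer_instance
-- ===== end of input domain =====

-- B replaces A's nested forward scans by one reverse pass per container with a
-- value → largest-later-index dict (objective: alternative — a different algorithm).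

-- ===== PORT A =====
-- inner 'for j in range(i+3, len(nodeids)): if nodeids[j]==nodeids[i]: res+=1; break'
def pvInnerA (nodeids : List Int) (i : Int) : List Int → Int → Int
  | [], res => res
  | j :: rest, res =>
    if PySem.List.pyGet? nodeids j = PySem.List.pyGet? nodeids i then res + 1
    else pvInnerA nodeids i rest res

def getNumOfLongTravel (trace : List (String × List Int)) : Int :=
  trace.foldl (fun res p =>
    let nodeids := p.2
    (PySem.List.pyRange 0 nodeids.length 1).foldl
      (fun res i => pvInnerA nodeids i (PySem.List.pyRange (i + 3) nodeids.length 1) res)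
      res) 0

-- ===== PORT B =====
-- one step of the reverse loop: state (res, last)
def pvStepB (st : Int × PySem.Dict Int Int) (q : Int × Int) : Int × PySem.Dict Int Int :=
  let (res, last) := st
  let (i, v) := q
  let res := if last.contains v && decide (last.getD v 0 ≥ i + 3) then res + 1 else res
  let last := if last.contains v then last else last.insert v i
  (res, last)

def getNumOfLongTravel_alt (trace : List (String × List Int)) : Int :=
  trace.foldl (fun res p =>
    let nodeids := p.2
    (((PySem.List.enumerate nodeids).reverse).foldl pvStepB
      (res, (PySem.Dict.empty : PySem.Dict Int Int))).1) 0

-- ===== PRECONDITION & SPEC =====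
def Spec_getNumOfLongTravel (trace : List (String × List Int)) (out : Int) : Prop := out = getNumOfLongTravel_alt trace
instance (trace : List (String × List Int)) (out : Int) : Decidable (Spec_getNumOfLongTravel trace out) := by unfold Spec_getNumOfLongTravel; infer_instance

-- ===== CLAIM (what is proved, stated in full; the proofs are below) =====
def Claim_equal_getNumOfLongTravel : Prop := ∀ (trace : List (String × List Int)), Dom_getNumOfLongTravel trace → Spec_getNumOfLongTravel trace (getNumOfLongTravel trace)

-- ===== LEMMAS AND PROOFS =====

-- common specification: per container, count positions whose value recurs at distance ≥ 3
def pvSpecC : List Int → Int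
  | [] => 0
  | x :: rest => (if x ∈ rest.drop 2 then 1 else 0) + pvSpecC rest

-- index of the LAST occurrence of v
def pvLastIdx? (v : Int) : List Int → Option Nat
  | [] => none
  | y :: r =>
    match pvLastIdx? v r with
    | some m => some (m + 1)
    | none => if y = v then some 0 else none

theorem pvLastIdx?_eq_none {v : Int} {r : List Int} : pvLastIdx? v r = none ↔ v ∉ r := by
  induction r with
  | nil => simp [pvLastIdx?]
  | cons y t ih =>
    cases hlt : pvLastIdx? v t with
    | some m =>
      have hvt : v ∈ t := by
        by_contra hv
        simp [ih.mpr hv] at hlt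
      simp [pvLastIdx?, hlt, hvt]
    | none =>
      have hvt : v ∉ t := ih.mp hlt
      by_cases hy : y = v
      · simp [pvLastIdx?, hlt, hy]
      · have hvy : v ≠ y := fun h' => hy h'.symm
        simp [pvLastIdx?, hlt, hy, hvt, hvy]

theorem pvLastIdx?_mem_drop {v : Int} {r : List Int} {m : Nat}
    (h : pvLastIdx? v r = some m) : ∀ j : Nat, v ∈ r.drop j ↔ j ≤ m := by
  induction r generalizing m with
  | nil => simp [pvLastIdx?] at h
  | cons y t ih =>
    intro j
    cases hlt : pvLastIdx? v t with
    | some m' =>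
      have hm : m = m' + 1 := by
        simp [pvLastIdx?, hlt] at h
        omega
      subst hm
      cases j with
      | zero =>
        have hvt : v ∈ t := by simpa using (ih hlt 0).mpr (Nat.zero_le _)
        simp [hvt]
      | succ j' => simpa using (ih hlt j').trans (by omega)
    | none =>
      have hvt : v ∉ t := pvLastIdx?_eq_none.mp hlt
      obtain ⟨hy, hm⟩ : y = v ∧ m = 0 := by
        by_cases hy' : y = v
        · simp [pvLastIdx?, hlt, hy'] at h
          exact ⟨hy', by omega⟩
        · simp [pvLastIdx?, hlt, hy'] at h
      subst hm
      cases j with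
      | zero => simp [hy]
      | succ j' =>
        simp only [List.drop_succ_cons]
        constructor
        · intro hv; exact absurd (List.mem_of_mem_drop hv) hvt
        · omega

-- A's inner loop computes the membership indicator on the drop-suffix
theorem pvInnerA_eq (k : Nat) : ∀ (a : List Int) (i : Int) (x : Int),
    PySem.List.pyGet? a i = some x → ∀ (t : Nat) (res : Int), a.length ≤ t + k →
    pvInnerA a i (PySem.List.pyRange (t : Int) (a.length : Int) 1) res
      = res + (if x ∈ a.drop t then 1 else 0) := by
  induction k with
  | zero =>
    intro a i x hx t res hlen
    have hd : a.drop t = [] := List.drop_eq_nil_of_le (by omega)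
    rw [PySem.List.pyRange_one_eq_nil (by exact_mod_cast (by omega : a.length ≤ t))]
    simp [pvInnerA, hd]
  | succ k ih =>
    intro a i x hx t res hlen
    by_cases ht' : a.length ≤ t
    · have hd : a.drop t = [] := List.drop_eq_nil_of_le ht'
      rw [PySem.List.pyRange_one_eq_nil (by exact_mod_cast ht')]
      simp [pvInnerA, hd]
    · have ht : t < a.length := by omega
      rw [PySem.List.pyRange_one_cons (by exact_mod_cast ht)]
      have hget : PySem.List.pyGet? a (t : Int) = some a[t] := by
        simp [PySem.List.pyGet?_natCast, List.getElem?_eq_getElem ht]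
      have hdrop : a.drop t = a[t] :: a.drop (t + 1) := List.drop_eq_getElem_cons ht
      simp only [pvInnerA, hget, hx]
      by_cases hxx : a[t] = x
      · rw [if_pos (by rw [hxx]), hdrop]
        simp [hxx]
      · have hcast : ((t : Int) + 1) = ((t + 1 : Nat) : Int) := by push_cast; ring
        rw [if_neg (by simp [hxx]), hcast, ih a i x hx (t + 1) res (by omega)]
        have hxne : x ≠ a[t] := fun h' => hxx h'.symm
        simp only [hdrop, List.mem_cons]
        simp [hxne]

-- A's outer loop from t accumulates pvSpecC of the drop-suffix
theorem pvOuterA_eq (k : Nat) : ∀ (a : List Int) (t : Nat) (res : Int), a.length ≤ t + k →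
    (PySem.List.pyRange (t : Int) (a.length : Int) 1).foldl
      (fun res i => pvInnerA a i (PySem.List.pyRange (i + 3) (a.length : Int) 1) res) res
      = res + pvSpecC (a.drop t) := by
  induction k with
  | zero =>
    intro a t res hlen
    have hd : a.drop t = [] := List.drop_eq_nil_of_le (by omega)
    rw [PySem.List.pyRange_one_eq_nil (by exact_mod_cast (by omega : a.length ≤ t))]
    simp [hd, pvSpecC]
  | succ k ih =>
    intro a t res hlen
    by_cases ht' : a.length ≤ t
    · have hd : a.drop t = [] := List.drop_eq_nil_of_le ht'
      rw [PySem.List.pyRange_one_eq_nil (by exact_mod_cast ht')]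
      simp [hd, pvSpecC]
    · have ht : t < a.length := by omega
      rw [PySem.List.pyRange_one_cons (by exact_mod_cast ht)]
      have hget : PySem.List.pyGet? a (t : Int) = some a[t] := by
        simp [PySem.List.pyGet?_natCast, List.getElem?_eq_getElem ht]
      have hcast3 : ((t : Int) + 3) = ((t + 3 : Nat) : Int) := by push_cast; ring
      have hcast1 : ((t : Int) + 1) = ((t + 1 : Nat) : Int) := by push_cast; ring
      simp only [List.foldl_cons]
      rw [hcast3, pvInnerA_eq (k + 1) a (t : Int) a[t] hget (t + 3) res (by omega),
          hcast1, ih a (t + 1) _ (by omega)]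
      have hdrop : a.drop t = a[t] :: a.drop (t + 1) := List.drop_eq_getElem_cons ht
      rw [hdrop]
      have h23 : (a.drop (t + 1)).drop 2 = a.drop (t + 3) := by
        rw [List.drop_drop]
      simp only [pvSpecC, h23]
      ring

-- A per container
theorem pvA_list (a : List Int) (res : Int) :
    (PySem.List.pyRange 0 (a.length : Int) 1).foldl
      (fun res i => pvInnerA a i (PySem.List.pyRange (i + 3) (a.length : Int) 1) res) res
      = res + pvSpecC a := by
  have := pvOuterA_eq a.length a 0 res (by omega)
  simpa using this

-- B's reverse fold (as a foldr over enumerate): result and dict invariant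
theorem pvB_foldr (a : List Int) : ∀ (k : Int) (res : Int),
    ((PySem.List.enumerate a k).foldr (fun q st => pvStepB st q)
        (res, (PySem.Dict.empty : PySem.Dict Int Int))).1 = res + pvSpecC a
    ∧ ∀ w : Int,
      ((PySem.List.enumerate a k).foldr (fun q st => pvStepB st q)
          (res, (PySem.Dict.empty : PySem.Dict Int Int))).2.get? w
        = (pvLastIdx? w a).map (fun m => k + (m : Int)) := by
  induction a with
  | nil =>
    intro k res
    simp [PySem.List.enumerate_nil, pvSpecC, pvLastIdx?, PySem.Dict.get?_empty]
  | cons x rest ih =>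
    intro k res
    rw [PySem.List.enumerate_cons]
    simp only [List.foldr_cons]
    obtain ⟨h1, h2⟩ := ih (k + 1) res
    set st := ((PySem.List.enumerate rest (k + 1)).foldr (fun q st => pvStepB st q)
        (res, (PySem.Dict.empty : PySem.Dict Int Int))) with hst
    have hcontains : st.2.contains x = (st.2.get? x).isSome :=
      PySem.Dict.contains_eq_isSome_get? _ _
    cases hlx : pvLastIdx? x rest with
    | some m =>
      have hget : st.2.get? x = some (k + 1 + (m : Int)) := by rw [h2 x, hlx]; rfl
      have hgd : st.2.getD x 0 = k + 1 + (m : Int) :=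
        PySem.Dict.getD_of_get?_eq_some st.2 0 hget
      have hc : st.2.contains x = true := by rw [hcontains, hget]; rfl
      have hifd : (if st.2.contains x = true then st.2 else st.2.insert x k) = st.2 := by
        simp [hc]
      have hmem : x ∈ rest.drop 2 ↔ 2 ≤ m := pvLastIdx?_mem_drop hlx 2
      constructor
      · -- result component
        simp only [pvStepB, hc, hgd, Bool.true_and, h1]
        by_cases h3 : k + 1 + (m : Int) ≥ k + 3
        · have hx2 : x ∈ rest.drop 2 := hmem.mpr (by omega)
          rw [if_pos (by simp [h3]), pvSpecC, if_pos hx2]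
          ring
        · have hx2 : x ∉ rest.drop 2 := fun hm' => h3 (by have := hmem.mp hm'; omega)
          rw [if_neg (by simp [h3]), pvSpecC, if_neg hx2]
          ring
      · -- dict component
        intro w
        simp only [pvStepB, hifd]
        rw [h2 w]
        rw [pvLastIdx?]
        cases hlw : pvLastIdx? w rest with
        | some m' =>
          simp
          ring
        | none =>
          have hvx : ¬ x = w := by
            intro h'
            rw [h', hlw] at hlx
            simp at hlx
          simp [hvx]
    | none =>
      have hget : st.2.get? x = none := by rw [h2 x, hlx]; rfl
      have hc : st.2.contains x = false := by rw [hcontains, hget]; rfl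
      have hnx : x ∉ rest := pvLastIdx?_eq_none.mp hlx
      have hifd : (if st.2.contains x = true then st.2 else st.2.insert x k) = st.2.insert x k := by
        simp [hc]
      constructor
      · have hnd : x ∉ rest.drop 2 := fun hm' => hnx (List.mem_of_mem_drop hm')
        simp only [pvStepB]
        rw [if_neg (by simp [hc]), h1, pvSpecC, if_neg hnd]
        ring
      · intro w
        simp only [pvStepB, hifd]
        rw [pvLastIdx?]
        by_cases hwx : w = x
        · rw [hwx, PySem.Dict.get?_insert_self st.2 x k, hlx]
          simp
        · rw [PySem.Dict.get?_insert_of_ne st.2 k hwx, h2 w]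
          cases hlw : pvLastIdx? w rest with
          | some m' =>
            simp
            ring
          | none =>
            have : ¬ x = w := fun h' => hwx h'.symm
            simp [this]

-- B per container
theorem pvB_list (a : List Int) (res : Int) :
    (((PySem.List.enumerate a).reverse).foldl pvStepB
        (res, (PySem.Dict.empty : PySem.Dict Int Int))).1 = res + pvSpecC a := by
  rw [List.foldl_reverse]
  exact (pvB_foldr a 0 res).1

-- ===== VERDICT (by name: the statement is the Claim_ definition above) =====
theorem pvTrace_eq (trace : List (String × List Int)) :
    getNumOfLongTravel trace = getNumOfLongTravel_alt trace := by
  unfold getNumOfLongTravel getNumOfLongTravel_alt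
  induction trace using List.reverseRecOn with
  | nil => rfl
  | append_singleton rest p ih =>
    simp only [List.foldl_append, List.foldl_cons, List.foldl_nil]
    rw [ih]
    exact (pvA_list p.2 _).trans (pvB_list p.2 _).symm

theorem getNumOfLongTravel_spec : Claim_equal_getNumOfLongTravel :=
  fun trace _ => pvTrace_eq trace
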